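-- pv_equiv track=rewrite | github.com/SHanmapur/python | python_basket_solution.py | process_csv_for_data
-- ===== SOURCE A (Python) =====
-- def process_csv_for_data(csv_2d_array):
--     # method to process csv data to 2D array
--     fruits_data = []
--     size_data = []
--     color_data = []
--     shape_data = []
--     days_data = []
--     color_shape = []
--
--     csv_2d_array.pop(0)
--     # flattening 2d array to single array of each coulmn
--     for data in csv_2d_array:
--         fruits_data.append(data[0])
--         size_data.append(int(data[1]))
--         color_data.append(data[2])
--         shape_data.append(data[3])
--         color_shape.append(data[2] + ", " + data[3])
--         days_data.append(data[4])
--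
--     return fruits_data, size_data, color_data, shape_data, days_data, color_shape
-- ===== SOURCE B (Python) =====
-- def process_csv_for_data(csv_2d_array):
--     # drop the header row (same in-place mutation as the original)
--     csv_2d_array.pop(0)
--     if not csv_2d_array:
--         return [], [], [], [], [], []
--     # transpose and build each output column-wise
--     cols = list(zip(*csv_2d_array))
--     fruits_data = list(cols[0])
--     size_data = [int(x) for x in cols[1]]
--     color_data = list(cols[2])
--     shape_data = list(cols[3])
--     days_data = list(cols[4])
--     color_shape = [c + ", " + s for c, s in zip(color_data, shape_data)]
--     return fruits_data, size_data, color_data, shape_data, days_data, color_shape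
-- ===== Notes on version B (the rewrite author's own statement) =====
-- stated objective: idiomatic
-- what changed: Row-wise loop with six parallel appends replaced by a zip(*rows) transpose that builds each output column at once (column-wise comprehensions instead of an accumulator loop).
import Mathlib
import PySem

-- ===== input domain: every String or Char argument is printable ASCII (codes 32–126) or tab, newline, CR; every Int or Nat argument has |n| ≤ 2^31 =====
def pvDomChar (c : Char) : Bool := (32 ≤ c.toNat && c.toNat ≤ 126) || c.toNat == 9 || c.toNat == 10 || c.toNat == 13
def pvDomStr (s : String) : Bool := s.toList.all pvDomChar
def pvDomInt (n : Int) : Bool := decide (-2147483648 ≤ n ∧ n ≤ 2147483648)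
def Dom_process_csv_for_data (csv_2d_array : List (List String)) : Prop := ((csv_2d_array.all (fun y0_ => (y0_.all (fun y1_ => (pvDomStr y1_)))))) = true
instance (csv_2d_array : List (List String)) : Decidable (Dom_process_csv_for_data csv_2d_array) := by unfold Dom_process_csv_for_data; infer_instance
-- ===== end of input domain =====

-- B replaces A's row-wise append loop by a zip-transpose building each column at once (idiomatic; return value only:
-- both Pythons pop the header from the argument in place).

-- ===== PORT A =====
-- the for-loop of A: six accumulator lists, one append each per row, in A's loop order
def pvLoopA (rows : List (List String)) : List String × List Int × List String × List String × List String × List String :=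
  rows.foldl (fun acc data =>
    (acc.1 ++ [(PySem.List.pyGet? data 0).getD ""],
     acc.2.1 ++ [((PySem.List.pyGet? data 1).bind PySem.Int.ofStr?).getD 0],
     acc.2.2.1 ++ [(PySem.List.pyGet? data 2).getD ""],
     acc.2.2.2.1 ++ [(PySem.List.pyGet? data 3).getD ""],
     acc.2.2.2.2.1 ++ [(PySem.List.pyGet? data 4).getD ""],
     acc.2.2.2.2.2 ++ [(PySem.List.pyGet? data 2).getD "" ++ ", " ++ (PySem.List.pyGet? data 3).getD ""]))
    ([], [], [], [], [], [])

def process_csv_for_data (csv_2d_array : List (List String)) : List String × List Int × List String × List String × List String × List String :=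
  -- csv_2d_array.pop(0): the loop runs over the remaining rows (Pre_ excludes the empty list, where pop raises)
  pvLoopA (csv_2d_array.drop 1)

-- ===== PORT B =====
-- list(cols[i]) of cols = zip(*rows): the i-th entry of every row
def pvCol (rows : List (List String)) (i : Int) : List String :=
  rows.map (fun r => (PySem.List.pyGet? r i).getD "")

def process_csv_for_data_alt (csv_2d_array : List (List String)) : List String × List Int × List String × List String × List String × List String :=
  let rows := csv_2d_array.drop 1
  if rows.isEmpty then ([], [], [], [], [], [])
  else
    let fruits_data := pvCol rows 0
    let size_data := (pvCol rows 1).map (fun x => (PySem.Int.ofStr? x).getD 0)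
    let color_data := pvCol rows 2
    let shape_data := pvCol rows 3
    let days_data := pvCol rows 4
    let color_shape := (color_data.zip shape_data).map (fun p => p.1 ++ ", " ++ p.2)
    (fruits_data, size_data, color_data, shape_data, days_data, color_shape)

-- ===== PRECONDITION & SPEC =====
-- Pre_ excludes exactly the inputs on which A raises: an empty list (pop(0) → IndexError), a data row with
-- fewer than 5 fields (IndexError), or a second field int() cannot parse (ValueError).
def Pre_process_csv_for_data (csv_2d_array : List (List String)) : Prop :=
  csv_2d_array ≠ [] ∧ ∀ row ∈ csv_2d_array.drop 1,
    5 ≤ row.length ∧ (PySem.Int.ofStr? (row.getD 1 "")).isSome = true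
instance (csv_2d_array : List (List String)) : Decidable (Pre_process_csv_for_data csv_2d_array) := by
  unfold Pre_process_csv_for_data; infer_instance
def pvWitness_process_csv_for_data : List (List String) :=
  [["fruit", "size", "color", "shape", "days"], ["apple", "3", "red", "round", "7"]]

def Spec_process_csv_for_data (csv_2d_array : List (List String)) (out : List String × List Int × List String × List String × List String × List String) : Prop := out = process_csv_for_data_alt csv_2d_array
instance (csv_2d_array : List (List String)) (out : List String × List Int × List String × List String × List String × List String) : Decidable (Spec_process_csv_for_data csv_2d_array out) := by unfold Spec_process_csv_for_data; infer_instance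

-- ===== CLAIM (what is proved, stated in full; the proofs are below) =====
def Claim_equal_process_csv_for_data : Prop := ∀ (csv_2d_array : List (List String)), Dom_process_csv_for_data csv_2d_array → Pre_process_csv_for_data csv_2d_array → Spec_process_csv_for_data csv_2d_array (process_csv_for_data csv_2d_array)

-- ===== LEMMAS AND PROOFS =====

-- A's fold with six appended accumulators, characterised column-wise
lemma pvLoopA_eq (rows : List (List String))
    (f : List String) (s : List Int) (c sh d cs : List String) :
    rows.foldl (fun acc data =>
      (acc.1 ++ [(PySem.List.pyGet? data 0).getD ""],
       acc.2.1 ++ [((PySem.List.pyGet? data 1).bind PySem.Int.ofStr?).getD 0],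
       acc.2.2.1 ++ [(PySem.List.pyGet? data 2).getD ""],
       acc.2.2.2.1 ++ [(PySem.List.pyGet? data 3).getD ""],
       acc.2.2.2.2.1 ++ [(PySem.List.pyGet? data 4).getD ""],
       acc.2.2.2.2.2 ++ [(PySem.List.pyGet? data 2).getD "" ++ ", " ++ (PySem.List.pyGet? data 3).getD ""]))
      (f, s, c, sh, d, cs)
    = (f ++ rows.map (fun r => (PySem.List.pyGet? r 0).getD ""),
       s ++ rows.map (fun r => ((PySem.List.pyGet? r 1).bind PySem.Int.ofStr?).getD 0),
       c ++ rows.map (fun r => (PySem.List.pyGet? r 2).getD ""),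
       sh ++ rows.map (fun r => (PySem.List.pyGet? r 3).getD ""),
       d ++ rows.map (fun r => (PySem.List.pyGet? r 4).getD ""),
       cs ++ rows.map (fun r => (PySem.List.pyGet? r 2).getD "" ++ ", " ++ (PySem.List.pyGet? r 3).getD "")) := by
  induction rows generalizing f s c sh d cs with
  | nil => simp
  | cons r rest ih => simp [List.foldl_cons, ih]

-- with at least two fields, data[1] is row.getD 1 "", so the bind collapses to a plain parse
lemma pvSize_entry (row : List String) (h5 : 5 ≤ row.length) :
    ((PySem.List.pyGet? row 1).bind PySem.Int.ofStr?).getD 0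
      = (PySem.Int.ofStr? ((PySem.List.pyGet? row 1).getD "")).getD 0 := by
  have h : PySem.List.pyGet? row 1 = some (row.getD 1 "") := by
    have : (1 : Int) = ((1 : Nat) : Int) := by norm_num
    rw [this, PySem.List.pyGet?_natCast]
    simp [List.getElem?_eq_getElem (by omega : 1 < row.length), List.getD]
  rw [h]; rfl

-- ===== VERDICT (by name: the statement is the Claim_ definition above) =====
theorem process_csv_for_data_spec : Claim_equal_process_csv_for_data := by
  intro l _ hpre
  obtain ⟨-, hrows⟩ := hpre
  unfold Spec_process_csv_for_data process_csv_for_data process_csv_for_data_alt pvLoopA pvCol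
  rw [pvLoopA_eq]
  generalize hdrop : l.drop 1 = rows at hrows ⊢
  cases rows with
  | nil => simp
  | cons r rest =>
    rw [if_neg (by simp)]
    simp only [List.nil_append, List.map_map, List.zip_map', Prod.mk.injEq]
    refine ⟨trivial, ?_, trivial, trivial, trivial, by simp [Function.comp]⟩
    exact List.map_congr_left (fun row hmem => by
      simp only [Function.comp_apply]
      exact pvSize_entry row (hrows row hmem).1)
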